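-- pv_equiv track=rewrite | github.com/MackanT/Poker-TD | Main.py | __best_card_multiple
-- ===== SOURCE A (Python) =====
-- def __best_card_multiple(cards):
--
--     seen = {}
--     dupes = []
--
--     for x in cards:
--         if x not in seen:
--             seen[x] = 1
--         else:
--             if seen[x] == 1:
--                 dupes.append(x)
--             seen[x] += 1
--
--     return seen, dupes
-- ===== SOURCE B (Python) =====
-- def __best_card_multiple(cards):
--     seen = {x: cards.count(x) for x in cards}
--     dupes = [x for i, x in enumerate(cards) if cards[:i].count(x) == 1]
--     return seen, dupes
-- ===== Notes on version B (the rewrite author's own statement) =====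
-- stated objective: simpler
-- what changed: Replaces the fused stateful loop (dict built and dupes appended in one pass with mutation) by two declarative comprehensions: a count-table dict comprehension and a prefix-count filter that lists each element exactly at its second occurrence.
import Mathlib
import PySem

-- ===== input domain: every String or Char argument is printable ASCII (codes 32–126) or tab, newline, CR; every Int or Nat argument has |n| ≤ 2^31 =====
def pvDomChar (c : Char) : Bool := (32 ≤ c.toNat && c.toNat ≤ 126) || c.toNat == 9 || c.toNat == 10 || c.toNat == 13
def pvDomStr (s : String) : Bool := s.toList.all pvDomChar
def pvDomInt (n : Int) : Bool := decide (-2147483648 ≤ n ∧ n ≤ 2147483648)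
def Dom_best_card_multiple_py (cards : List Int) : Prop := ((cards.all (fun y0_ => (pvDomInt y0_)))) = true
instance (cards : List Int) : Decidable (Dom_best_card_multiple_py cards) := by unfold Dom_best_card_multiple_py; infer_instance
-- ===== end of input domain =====

-- B replaces A's fused stateful loop by two declarative comprehensions (a count-table dict
-- comprehension and a prefix-count filter); objective: simpler, not faster.


-- ===== PORT A =====
-- one loop iteration of A: state is (seen, dupes); branches in A's order.
-- 'seen[x]' in the else-branch is read with getD (exact: contains holds there, so no KeyError).
def pvAStep (st : PySem.Dict Int Int × List Int) (x : Int) : PySem.Dict Int Int × List Int :=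
  if st.1.contains x = false then
    (st.1.insert x 1, st.2)
  else
    (st.1.insert x (st.1.getD x 0 + 1),
     if st.1.getD x 0 == 1 then st.2 ++ [x] else st.2)

def best_card_multiple_py (cards : List Int) : (List (Int × Int)) × List Int :=
  let st := cards.foldl pvAStep (PySem.Dict.empty, [])
  (st.1.items, st.2)

-- ===== PORT B =====
-- seen = {x: cards.count(x) for x in cards}; dupes = [x for i,x in enumerate(cards) if cards[:i].count(x) == 1]
def best_card_multiple_py_alt (cards : List Int) : (List (Int × Int)) × List Int :=
  let seen := cards.foldl (fun d x => d.insert x ((cards.count x : Int))) PySem.Dict.empty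
  let dupes := ((PySem.List.enumerate cards 0).filter
      (fun q => (PySem.List.slice cards none (some q.1)).count q.2 == 1)).map (·.2)
  (seen.items, dupes)

-- ===== PRECONDITION & SPEC =====
def Spec_best_card_multiple_py (cards : List Int) (out : (List (Int × Int)) × List Int) : Prop := out = best_card_multiple_py_alt cards
instance (cards : List Int) (out : (List (Int × Int)) × List Int) : Decidable (Spec_best_card_multiple_py cards out) := by unfold Spec_best_card_multiple_py; infer_instance

-- ===== CLAIM (what is proved, stated in full; the proofs are below) =====
def Claim_equal_best_card_multiple_py : Prop := ∀ (cards : List Int), Dom_best_card_multiple_py cards → Spec_best_card_multiple_py cards (best_card_multiple_py cards)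

-- ===== LEMMAS AND PROOFS =====

-- dupes of the yet-unprocessed suffix l, given already-processed prefix p
def pvDupesAux : List Int → List Int → List Int
  | _, [] => []
  | p, x :: l => (if p.count x = 1 then [x] else []) ++ pvDupesAux (p ++ [x]) l

theorem pvCounter_snoc (p : List Int) (x : Int) :
    PySem.Dict.counter (p ++ [x])
      = (PySem.Dict.counter p).insert x ((PySem.Dict.counter p).getD x 0 + 1) := by
  rw [PySem.Dict.counter_append_singleton]; rfl

-- invariant of A's fold: dict is the counter of the processed prefix, dupes grow by pvDupesAux
theorem pvAFold (l : List Int) : ∀ (p acc : List Int),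
    l.foldl pvAStep (PySem.Dict.counter p, acc)
      = (PySem.Dict.counter (p ++ l), acc ++ pvDupesAux p l) := by
  induction l with
  | nil => intro p acc; simp [pvDupesAux]
  | cons x l ih =>
    intro p acc
    have hstep : pvAStep (PySem.Dict.counter p, acc) x
        = (PySem.Dict.counter (p ++ [x]), acc ++ (if p.count x = 1 then [x] else [])) := by
      by_cases hx : x ∈ p
      · have hc : (PySem.Dict.counter p).contains x = true := by
          simp [PySem.Dict.contains_counter, hx]
        simp [pvAStep, hc, pvCounter_snoc, PySem.Dict.getD_counter]
        split_ifs <;> simp_all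
      · have hc : (PySem.Dict.counter p).contains x = false := by
          simp [PySem.Dict.contains_counter, hx]
        have hcnt : p.count x = 0 := List.count_eq_zero.mpr hx
        simp [pvAStep, hc, pvCounter_snoc, PySem.Dict.getD_counter, hcnt]
    simp only [List.foldl_cons, hstep, ih (p ++ [x])]
    simp [pvDupesAux]

-- B's dict is the counter: its getD agrees everywhere and the keys/items coincide
theorem pvBDictGetD (c : Int → Int) (l : List Int) : ∀ (d : PySem.Dict Int Int) (v : Int),
    (l.foldl (fun d x => d.insert x (c x)) d).getD v 0
      = if v ∈ l then c v else d.getD v 0 := by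
  induction l with
  | nil => intro d v; simp
  | cons x l ih =>
    intro d v
    simp only [List.foldl_cons, ih]
    by_cases hvl : v ∈ l
    · simp [hvl]
    · by_cases hvx : v = x
      · subst hvx; simp [hvl, PySem.Dict.getD_insert_self]
      · simp [hvl, hvx, PySem.Dict.getD_insert]

theorem pvBDictEq (cards : List Int) :
    cards.foldl (fun d x => d.insert x ((cards.count x : Int))) PySem.Dict.empty
      = PySem.Dict.counter cards := by
  apply PySem.Dict.ext
  have hk : (cards.foldl (fun d x => d.insert x ((cards.count x : Int))) PySem.Dict.empty).keys
      = PySem.Set.ofList cards := by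
    rw [PySem.Dict.keys_foldl_insert]
    simp [PySem.Set.ofList_eq_foldl, PySem.Set.update, PySem.Dict.keys_empty]
  have hnd : (cards.foldl (fun d x => d.insert x ((cards.count x : Int))) PySem.Dict.empty).keys.Nodup :=
    PySem.Dict.nodup_keys_foldl_insert _ _ _ (by simp [PySem.Dict.keys_empty])
  rw [PySem.Dict.items_eq_map_keys _ hnd 0, PySem.Dict.items_counter, hk]
  apply List.map_congr_left
  intro k hkmem
  have hkc : k ∈ cards := (PySem.Set.mem_ofList _ _).mp hkmem
  simp [pvBDictGetD, hkc]

-- B's comprehension computes pvDupesAux, generalized over the processed prefix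
theorem pvBDupes (l : List Int) : ∀ (p : List Int),
    ((PySem.List.enumerate l ((p.length : Nat) : Int)).filter
        (fun q => (PySem.List.slice (p ++ l) none (some q.1)).count q.2 == 1)).map (·.2)
      = pvDupesAux p l := by
  induction l with
  | nil => intro p; simp [PySem.List.enumerate_nil, pvDupesAux]
  | cons x l ih =>
    intro p
    rw [PySem.List.enumerate_cons]
    have hsl : PySem.List.slice (p ++ x :: l) none (some ((p.length : Nat) : Int))
        = p := by
      rw [PySem.List.slice_to_natCast]; exact List.take_left
    have harith : ((p.length : Nat) : Int) + 1 = (((p ++ [x]).length : Nat) : Int) := by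
      simp
    have htail : (PySem.List.enumerate l (((p.length : Nat) : Int) + 1)).filter
          (fun q => (PySem.List.slice (p ++ x :: l) none (some q.1)).count q.2 == 1)
        = (PySem.List.enumerate l ((((p ++ [x]).length : Nat) : Int))).filter
          (fun q => (PySem.List.slice ((p ++ [x]) ++ l) none (some q.1)).count q.2 == 1) := by
      rw [← harith]
      apply List.filter_congr
      intro q hq
      rw [List.append_cons]
    rw [List.filter_cons]
    simp only [hsl]
    by_cases h1 : p.count x = 1 <;>
      · simp [pvDupesAux, h1]
        rw [htail]
        exact ih (p ++ [x])

-- ===== VERDICT (by name: the statement is the Claim_ definition above) =====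
theorem best_card_multiple_py_spec : Claim_equal_best_card_multiple_py := by
  intro cards _
  unfold Spec_best_card_multiple_py best_card_multiple_py best_card_multiple_py_alt
  have hA := pvAFold cards [] []
  rw [show ((PySem.Dict.counter ([] : List Int)), ([] : List Int))
        = ((PySem.Dict.empty : PySem.Dict Int Int), ([] : List Int)) from rfl] at hA
  simp only [List.nil_append] at hA
  have hB := pvBDupes cards []
  simp only [List.length_nil, Nat.cast_zero, List.nil_append] at hB
  simp only [hA, pvBDictEq, hB]
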